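-- pv_equiv track=rewrite | github.com/egdman/mesh2d | mesh2d/boolean2d.py | cut_loop_into_pieces
-- ===== SOURCE A (Python) =====
-- def cut_loop_into_pieces(loop, cuts):
--     firstPiece = []
--     piece = []
--     wrap = True
--     for elem in loop:
--         if elem in cuts:
--             if wrap:
--                 firstPiece = piece
--                 wrap = False
--             else:
--                 yield piece
--             piece = [elem]
--         else:
--             piece.append(elem)
--     piece.extend(firstPiece)
--     yield piece
-- ===== SOURCE B (Python) =====
-- def cut_loop_into_pieces(loop, cuts):
--     lst = list(loop)
--     cutset = set(cuts)
--     positions = [i for i, e in enumerate(lst) if e in cutset]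
--     if not positions:
--         yield lst
--         return
--     first = lst[:positions[0]]
--     for a, b in zip(positions, positions[1:]):
--         yield lst[a:b]
--     yield lst[positions[-1]:] + first
-- ===== Notes on version B (the rewrite author's own statement) =====
-- stated objective: alternative
-- what changed: Replaces A's one-pass generator with wrap/firstPiece/piece mutable state by a staged index-based decomposition: first compute the list of cut positions via enumerate, then emit the pieces as slices lst[a:b] between consecutive positions, with the pre-first-cut prefix slice appended to the final wrap slice.
import Mathlib
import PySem

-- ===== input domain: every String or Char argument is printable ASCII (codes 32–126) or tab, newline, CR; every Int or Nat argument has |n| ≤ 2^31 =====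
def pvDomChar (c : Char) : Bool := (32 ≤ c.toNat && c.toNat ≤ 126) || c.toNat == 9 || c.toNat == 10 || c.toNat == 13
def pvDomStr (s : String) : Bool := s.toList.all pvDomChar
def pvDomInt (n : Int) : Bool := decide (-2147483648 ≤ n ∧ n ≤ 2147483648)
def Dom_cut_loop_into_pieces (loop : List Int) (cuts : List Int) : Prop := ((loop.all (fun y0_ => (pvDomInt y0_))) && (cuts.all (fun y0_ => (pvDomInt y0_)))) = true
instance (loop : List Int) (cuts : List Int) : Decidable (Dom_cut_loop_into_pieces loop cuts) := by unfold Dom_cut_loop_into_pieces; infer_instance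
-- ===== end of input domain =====

-- B replaces A's one-pass wrap-flag state machine by a staged decomposition: compute the cut
-- positions first, then emit the pieces as slices between consecutive positions; objective: alternative.

-- ===== PORT A =====
-- one loop step of A: state is (firstPiece, piece, wrap, yielded-so-far)
def pvStepA (cuts : List Int) :
    (List Int × List Int × Bool × List (List Int)) → Int →
    (List Int × List Int × Bool × List (List Int))
  | (fp, piece, wrap, acc), elem =>
    if elem ∈ cuts then
      if wrap then (piece, [elem], false, acc)
      else (fp, [elem], wrap, acc ++ [piece])
    else (fp, piece ++ [elem], wrap, acc)

def cut_loop_into_pieces (loop : List Int) (cuts : List Int) : List (List Int) :=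
  let st := loop.foldl (pvStepA cuts) ([], [], true, [])
  st.2.2.2 ++ [st.2.1 ++ st.1]

-- ===== PORT B =====
def cut_loop_into_pieces_alt (loop : List Int) (cuts : List Int) : List (List Int) :=
  let lst := loop
  let cutset := PySem.Set.ofList cuts
  let positions := (PySem.List.enumerate lst).filterMap
      (fun p => if p.2 ∈ cutset then some p.1 else none)
  match positions with
  | [] => [lst]
  | p0 :: _ =>
      let first := PySem.List.slice lst none (some p0)
      ((positions.zip positions.tail).map
        (fun ab => PySem.List.slice lst (some ab.1) (some ab.2)))
      ++ [PySem.List.slice lst (some (positions.getLastD 0)) none ++ first]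

-- ===== PRECONDITION & SPEC =====
def Spec_cut_loop_into_pieces (loop : List Int) (cuts : List Int) (out : List (List Int)) : Prop := out = cut_loop_into_pieces_alt loop cuts
instance (loop : List Int) (cuts : List Int) (out : List (List Int)) : Decidable (Spec_cut_loop_into_pieces loop cuts out) := by unfold Spec_cut_loop_into_pieces; infer_instance

-- ===== CLAIM (what is proved, stated in full; the proofs are below) =====
def Claim_equal_cut_loop_into_pieces : Prop := ∀ (loop : List Int) (cuts : List Int), Dom_cut_loop_into_pieces loop cuts → Spec_cut_loop_into_pieces loop cuts (cut_loop_into_pieces loop cuts)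

-- ===== LEMMAS AND PROOFS =====

-- proof helper: the Nat cut positions of lst, counting from s
def pvPos (cuts : List Int) : List Int → Nat → List Nat
  | [], _ => []
  | x :: xs, s => (if x ∈ cuts then [s] else []) ++ pvPos cuts xs (s + 1)

-- proof helper: the state A's fold reaches, expressed through the positions
def pvStateOf (lst : List Int) (P : List Nat) :
    List Int × List Int × Bool × List (List Int) :=
  match P with
  | [] => ([], lst, true, [])
  | p0 :: _ => (lst.take p0, lst.drop (P.getLastD 0), false,
      (P.zip P.tail).map (fun ab => (lst.drop ab.1).take (ab.2 - ab.1)))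

theorem pvPos_append (cuts : List Int) (lst : List Int) (e : Int) :
    ∀ s, pvPos cuts (lst ++ [e]) s =
      pvPos cuts lst s ++ (if e ∈ cuts then [s + lst.length] else []) := by
  induction lst with
  | nil => intro s; simp [pvPos]
  | cons x xs ih =>
    intro s
    simp only [List.cons_append, pvPos, ih (s + 1), List.length_cons, List.append_assoc]
    have h : s + 1 + xs.length = s + (xs.length + 1) := by omega
    rw [h]

theorem pvPos_mem_bounds (cuts : List Int) :
    ∀ (lst : List Int) (s p : Nat), p ∈ pvPos cuts lst s → s ≤ p ∧ p < s + lst.length := by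
  intro lst
  induction lst with
  | nil => intro s p h; simp [pvPos] at h
  | cons x xs ih =>
    intro s p h
    simp only [pvPos, List.mem_append] at h
    rcases h with h | h
    · by_cases hc : x ∈ cuts
      · simp [hc] at h; subst h; simp
      · simp [hc] at h
    · have := ih (s + 1) p h
      simp only [List.length_cons]
      omega

theorem pvGetLastD_mem (P : List Nat) (h : P ≠ []) : P.getLastD 0 ∈ P := by
  rw [List.getLastD_eq_getLast?, List.getLast?_eq_some_getLast h]
  exact List.getLast_mem h

theorem pvZip_tail_append (P : List Nat) (h : P ≠ []) (n : Nat) :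
    (P ++ [n]).zip (P ++ [n]).tail = P.zip P.tail ++ [(P.getLastD 0, n)] := by
  induction P with
  | nil => simp at h
  | cons p r ih =>
    match r with
    | [] => simp
    | q :: r' =>
      have := ih (by simp)
      simp only [List.cons_append, List.tail_cons, List.zip_cons_cons] at this ⊢
      rw [this]
      simp

-- main characterization of A's fold by the cut positions
theorem pvFoldA_char (cuts : List Int) (lst : List Int) :
    lst.foldl (pvStepA cuts) ([], [], true, []) = pvStateOf lst (pvPos cuts lst 0) := by
  induction lst using List.reverseRecOn with
  | nil => simp [pvStateOf, pvPos]
  | append_singleton lst e ih =>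
    rw [List.foldl_append, ih, pvPos_append]
    simp only [List.foldl_cons, List.foldl_nil, Nat.zero_add]
    have hb : ∀ p ∈ pvPos cuts lst 0, p < lst.length := by
      intro p hp; have := pvPos_mem_bounds cuts lst 0 p hp; omega
    by_cases hc : e ∈ cuts
    · simp only [if_pos hc]
      cases hP : pvPos cuts lst 0 with
      | nil => simp [pvStateOf, pvStepA, hc]
      | cons p0 rest =>
        have hne : (p0 :: rest : List Nat) ≠ [] := by simp
        have hp0 : p0 < lst.length := by
          apply hb; rw [hP]; simp
        have hlast : (p0 :: rest).getLastD 0 < lst.length := by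
          apply hb; rw [hP]; exact pvGetLastD_mem _ hne
        simp only [pvStateOf, pvStepA, if_pos hc, List.cons_append, Bool.false_eq_true,
          if_false, Prod.mk.injEq]
        refine ⟨?_, ?_, trivial, ?_⟩
        · exact (List.take_append_of_le_length (Nat.le_of_lt hp0)).symm
        · have hgl : ((p0 :: (rest ++ [lst.length])).getLastD 0) = lst.length := by
            rw [List.getLastD_eq_getLast?, ← List.cons_append, List.getLast?_concat]
            rfl
          rw [hgl]
          simp
        · have hz : (p0 :: (rest ++ [lst.length])).zip (p0 :: (rest ++ [lst.length])).tail =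
              (p0 :: rest).zip (p0 :: rest).tail ++ [((p0 :: rest).getLastD 0, lst.length)] := by
            simpa using pvZip_tail_append (p0 :: rest) hne lst.length
          rw [hz, List.map_append]
          congr 1
          · apply List.map_congr_left
            intro ab hab
            have hm1 : ab.1 ∈ (p0 :: rest) := (List.of_mem_zip hab).1
            have hm2 : ab.2 ∈ (p0 :: rest) := List.mem_of_mem_tail (List.of_mem_zip hab).2
            have hb1 : ab.1 < lst.length := by apply hb; rw [hP]; exact hm1
            have hb2 : ab.2 < lst.length := by apply hb; rw [hP]; exact hm2
            rw [List.drop_append_of_le_length (Nat.le_of_lt hb1),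
                List.take_append_of_le_length (by simp; omega)]
          · simp only [List.map_cons, List.map_nil, List.cons.injEq, and_true]
            rw [List.drop_append_of_le_length (Nat.le_of_lt hlast)]
            rw [List.take_append_of_le_length (by simp only [List.length_drop]; omega),
                List.take_of_length_le (by simp only [List.length_drop]; omega)]
    · simp only [if_neg hc, List.append_nil]
      cases hP : pvPos cuts lst 0 with
      | nil => simp [pvStateOf, pvStepA, hc]
      | cons p0 rest =>
        have hne : (p0 :: rest : List Nat) ≠ [] := by simp
        have hp0 : p0 < lst.length := by apply hb; rw [hP]; simp
        have hlast : (p0 :: rest).getLastD 0 < lst.length := by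
          apply hb; rw [hP]; exact pvGetLastD_mem _ hne
        simp only [pvStateOf, pvStepA, if_neg hc, Prod.mk.injEq]
        refine ⟨?_, ?_, trivial, ?_⟩
        · exact (List.take_append_of_le_length (Nat.le_of_lt hp0)).symm
        · exact (List.drop_append_of_le_length (Nat.le_of_lt hlast)).symm
        · apply List.map_congr_left
          intro ab hab
          have hm1 : ab.1 ∈ (p0 :: rest) := (List.of_mem_zip hab).1
          have hm2 : ab.2 ∈ (p0 :: rest) := List.mem_of_mem_tail (List.of_mem_zip hab).2
          have hb1 : ab.1 < lst.length := by apply hb; rw [hP]; exact hm1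
          have hb2 : ab.2 < lst.length := by apply hb; rw [hP]; exact hm2
          rw [List.drop_append_of_le_length (Nat.le_of_lt hb1),
              List.take_append_of_le_length (by simp; omega)]

-- B's filterMap over enumerate computes the Int casts of pvPos
theorem pvPositions_eq (cuts lst : List Int) :
    ∀ s : Nat, (PySem.List.enumerate lst (s : Int)).filterMap
      (fun p => if p.2 ∈ PySem.Set.ofList cuts then some p.1 else none) =
      (pvPos cuts lst s).map (fun (n : Nat) => (n : Int)) := by
  induction lst with
  | nil => intro s; simp [pvPos, PySem.List.enumerate_nil]
  | cons x xs ih =>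
    intro s
    rw [PySem.List.enumerate_cons]
    have hmem : (x ∈ PySem.Set.ofList cuts) ↔ x ∈ cuts := PySem.Set.mem_ofList cuts x
    have hstep := ih (s + 1)
    push_cast at hstep
    by_cases hc : x ∈ cuts
    · simp only [List.filterMap_cons, if_pos (hmem.2 hc), pvPos, if_pos hc]
      rw [hstep]
      simp
    · simp only [List.filterMap_cons, if_neg (fun h => hc (hmem.1 h)), pvPos, if_neg hc]
      rw [hstep]
      simp

-- the slice list B builds over the cast positions is the take/drop list over the Nat positions
theorem pvSlices_eq (lst : List Int) : ∀ (P : List Nat),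
    (((P.map (fun (n : Nat) => (n : Int))).zip ((P.map (fun (n : Nat) => (n : Int))).tail)).map
      (fun ab => PySem.List.slice lst (some ab.1) (some ab.2)))
    = (P.zip P.tail).map (fun ab => (lst.drop ab.1).take (ab.2 - ab.1))
  | [] => by simp
  | [a] => by simp
  | a :: b :: r => by
    have ih := pvSlices_eq lst (b :: r)
    simp only [List.map_cons, List.tail_cons, List.zip_cons_cons] at ih ⊢
    rw [PySem.List.slice_natCast, ih]

theorem pvGetLastD_map_cast (P : List Nat) (h : P ≠ []) :
    (P.map (fun (n : Nat) => (n : Int))).getLastD 0 = ((P.getLastD 0 : Nat) : Int) := by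
  rw [List.getLastD_eq_getLast?, List.getLastD_eq_getLast?, List.getLast?_map,
      List.getLast?_eq_some_getLast h]
  simp

-- ===== VERDICT (by name: the statement is the Claim_ definition above) =====
theorem cut_loop_into_pieces_spec : Claim_equal_cut_loop_into_pieces := by
  intro loop cuts _
  simp only [Spec_cut_loop_into_pieces, cut_loop_into_pieces, cut_loop_into_pieces_alt]
  rw [pvFoldA_char]
  have hpos := pvPositions_eq cuts loop 0
  simp only [Nat.cast_zero] at hpos
  rw [hpos]
  cases hP : pvPos cuts loop 0 with
  | nil => simp [pvStateOf]
  | cons p0 rest =>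
    have hne : (p0 :: rest : List Nat) ≠ [] := by simp
    simp only [pvStateOf, List.map_cons]
    have hz := pvSlices_eq loop (p0 :: rest)
    simp only [List.map_cons] at hz
    rw [hz]
    have hgl := pvGetLastD_map_cast (p0 :: rest) hne
    simp only [List.map_cons] at hgl
    rw [hgl, PySem.List.slice_from_natCast, PySem.List.slice_to_natCast]
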